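-- pv_equiv track=rewrite | github.com/amongus-pvp/ORACsolns | Selection Exam 2003, Day 1/SocialEngineering.py | r_line
-- ===== SOURCE A (Python) =====
-- def r_line(line):
--     numbers = list(map(int, line.split()))
--     groups = []
--     group = []
--     for num in numbers:
--         if num == 0:
--             groups.append(tuple(sorted(group)))
--             group = []
--         else:
--             group.append(num)
--     return tuple(sorted(groups))
-- ===== SOURCE B (Python) =====
-- def r_line(line):
--     numbers = [int(t) for t in line.split()]
--     groups = []
--     while 0 in numbers:
--         i = numbers.index(0)
--         groups.append(tuple(sorted(numbers[:i])))
--         numbers = numbers[i + 1:]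
--     groups.sort()
--     return tuple(groups)
-- ===== Notes on version B (the rewrite author's own statement) =====
-- stated objective: alternative
-- what changed: Replaces A's single-pass accumulator loop (flush the pending group at each zero) by a repeated find-first-zero-then-slice decomposition: while 0 is present, index(0) locates the boundary, the prefix slice is sorted into a group, and the loop continues on the suffix past the zero; trailing numbers after the last zero are dropped implicitly by the loop condition.
import Mathlib
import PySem

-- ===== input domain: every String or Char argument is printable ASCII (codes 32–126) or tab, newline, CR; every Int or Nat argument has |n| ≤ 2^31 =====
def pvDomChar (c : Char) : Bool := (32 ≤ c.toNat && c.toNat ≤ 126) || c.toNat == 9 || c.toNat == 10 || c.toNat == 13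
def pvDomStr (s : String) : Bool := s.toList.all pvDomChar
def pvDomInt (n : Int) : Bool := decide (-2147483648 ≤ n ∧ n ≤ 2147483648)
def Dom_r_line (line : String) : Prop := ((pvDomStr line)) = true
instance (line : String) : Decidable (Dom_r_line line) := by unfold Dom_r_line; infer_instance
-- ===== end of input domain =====

-- B replaces A's one-pass accumulator loop by repeated find-first-zero + slice (index/slice decomposition); objective: alternative structure, same behaviour.

-- ===== PORT A =====
-- A: single pass with (groups, group) accumulators; on 0 flush sorted group, else extend group; finally sort groups.
def r_line (line : String) : List (List Int) :=
  PySem.List.sorted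
    ((((PySem.Str.split₀ line).map (fun t => (PySem.Int.ofStr? t).getD 0)).foldl
      (fun (s : List (List Int) × List Int) num =>
        if num = 0 then (s.1 ++ [PySem.List.sorted s.2 (fun x => x) false], ([] : List Int))
        else (s.1, s.2 ++ [num]))
      (([] : List (List Int)), ([] : List Int))).1)
    (fun g => g) false

-- ===== PORT B =====
-- B's while-loop: while 0 in numbers, cut off numbers[:index(0)] as a sorted group, continue on numbers[index(0)+1:].
def r_line_groups (numbers : List Int) (groups : List (List Int)) : List (List Int) :=
  if h : 0 ∈ numbers then
    r_line_groups
      (PySem.List.slice numbers (some ((((PySem.List.index? numbers 0).getD 0 + 1 : Nat) : Int))) none)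
      (groups ++ [PySem.List.sorted
        (PySem.List.slice numbers none (some (((PySem.List.index? numbers 0).getD 0 : Nat) : Int)))
        (fun x => x) false])
  else groups
termination_by numbers.length
decreasing_by
  rw [PySem.List.slice_from_natCast]
  have hpos : 0 < numbers.length := List.length_pos_of_ne_nil (by rintro rfl; simp at h)
  simp only [List.length_drop]
  omega

def r_line_alt (line : String) : List (List Int) :=
  PySem.List.sorted
    (r_line_groups ((PySem.Str.split₀ line).map (fun t => (PySem.Int.ofStr? t).getD 0)) [])
    (fun g => g) false

-- ===== PRECONDITION & SPEC =====
-- Pre_ excludes exactly the lines with a whitespace-separated token that int() rejects, where A raises ValueError.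
def Pre_r_line (line : String) : Prop :=
  ∀ t ∈ PySem.Str.split₀ line, (PySem.Int.ofStr? t).isSome = true
instance (line : String) : Decidable (Pre_r_line line) := by unfold Pre_r_line; infer_instance
def pvWitness_r_line : String := "1 2 0 0 3 1 0 5"

def Spec_r_line (line : String) (out : List (List Int)) : Prop := out = r_line_alt line
instance (line : String) (out : List (List Int)) : Decidable (Spec_r_line line out) := by unfold Spec_r_line; infer_instance

-- ===== CLAIM (what is proved, stated in full; the proofs are below) =====
def Claim_equal_r_line : Prop := ∀ (line : String), Dom_r_line line → Pre_r_line line → Spec_r_line line (r_line line)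

-- ===== LEMMAS AND PROOFS =====

-- reference semantics: the groups produced when scanning l with pending group g (trailing pending group dropped)
def pvGroups : List Int → List Int → List (List Int)
  | [], _ => []
  | n :: t, g =>
    if n = 0 then PySem.List.sorted g (fun x => x) false :: pvGroups t []
    else pvGroups t (g ++ [n])

theorem pvGroups_no_zero (l : List Int) (g : List Int) (h : 0 ∉ l) : pvGroups l g = [] := by
  induction l generalizing g with
  | nil => rfl
  | cons n t ih =>
    simp only [List.mem_cons, not_or] at h
    simp [pvGroups, Ne.symm h.1, ih _ h.2]

theorem pvGroups_split (pre suf : List Int) (g : List Int) (h : 0 ∉ pre) :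
    pvGroups (pre ++ 0 :: suf) g
      = PySem.List.sorted (g ++ pre) (fun x => x) false :: pvGroups suf [] := by
  induction pre generalizing g with
  | nil => simp [pvGroups]
  | cons a pre ih =>
    simp only [List.mem_cons, not_or] at h
    simp only [List.cons_append, pvGroups, if_neg (Ne.symm h.1)]
    rw [ih _ h.2, List.append_assoc]
    rfl

theorem foldA_eq (l : List Int) (gs : List (List Int)) (g : List Int) :
    (l.foldl
      (fun (s : List (List Int) × List Int) num =>
        if num = 0 then (s.1 ++ [PySem.List.sorted s.2 (fun x => x) false], ([] : List Int))
        else (s.1, s.2 ++ [num])) (gs, g)).1 = gs ++ pvGroups l g := by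
  induction l generalizing gs g with
  | nil => simp [pvGroups]
  | cons n t ih =>
    by_cases hn : n = 0
    · subst hn; simp [pvGroups, ih]
    · simp [pvGroups, hn, ih]

theorem r_line_groups_eq (l : List Int) (gs : List (List Int)) :
    r_line_groups l gs = gs ++ pvGroups l [] := by
  induction hL : l.length using Nat.strong_induction_on generalizing l gs with
  | _ n ih =>
  subst hL
  rw [r_line_groups.eq_def]
  by_cases h : 0 ∈ l
  · rw [dif_pos h]
    have hs : (PySem.List.index? l 0).isSome = true := (PySem.List.index?_isSome_iff l 0).2 h
    obtain ⟨k, hk⟩ := Option.isSome_iff_exists.1 hs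
    obtain ⟨pre, suf, hl, hlen, hnp⟩ := (PySem.List.index?_eq_some_iff l 0 k).1 hk
    have hgetD : (PySem.List.index? l 0).getD 0 = k := by rw [hk]; rfl
    have htake : PySem.List.slice l none (some ((k : Nat) : Int)) = pre := by
      rw [PySem.List.slice_to_natCast, hl, ← hlen, List.take_left]
    have hdrop : PySem.List.slice l (some (((k + 1 : Nat) : Int))) none = suf := by
      rw [PySem.List.slice_from_natCast, hl, ← hlen]
      rw [show pre ++ 0 :: suf = (pre ++ [0]) ++ suf by simp]
      rw [show pre.length + 1 = (pre ++ [(0:Int)]).length by simp]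
      exact List.drop_left
    rw [hgetD, htake, hdrop]
    have hlt : suf.length < l.length := by
      rw [hl]; simp; omega
    rw [ih suf.length hlt suf _ rfl]
    rw [hl, pvGroups_split pre suf [] hnp]
    simp
  · rw [dif_neg h, pvGroups_no_zero l [] h, List.append_nil]

-- ===== VERDICT (by name: the statement is the Claim_ definition above) =====
theorem r_line_spec : Claim_equal_r_line := by
  intro line _ _
  unfold Spec_r_line r_line r_line_alt
  rw [foldA_eq, r_line_groups_eq]
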